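-- pv_equiv track=rewrite | github.com/Pasquale-Silv/Improving_Python | Hacker Rank Python/Prove sfide/prova sfida seria.py | mAggingi
-- ===== SOURCE A (Python) =====
-- def mAggingi(listM, listW):
--     listaNew = []
--     if(len(listM) % 2 == 0):
--         for i in range(0, len(listM), 2):
--             for woman in listW:
--                 listaNew.append([listM[i], listM[i + 1], woman])
--     elif(len(listM) % 2 != 0):
--         for i in range(0, len(listM), 2):
--             for woman in listW:
--                 try:
--                     listaNew.append([listM[i], listM[i + 1], woman])
--                 except:
--                     continue
--
--     return listaNew
-- ===== SOURCE B (Python) =====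
-- def mAggingi(listM, listW):
--     k = len(listM) // 2
--     col1 = [a for a in listM[::2] for _ in listW]
--     col2 = [b for b in listM[1::2] for _ in listW]
--     col3 = listW * k
--     return [[a, b, w] for a, b, w in zip(col1, col2, col3)]
-- ===== Notes on version B (the rewrite author's own statement) =====
-- stated objective: alternative
-- what changed: B replaces A's nested index loop (with parity branch and try/except) by a columnar construction: it builds three flat parallel columns (each even-indexed man repeated len(listW) times, each odd-indexed man repeated likewise, and listW tiled k times) and zips them into triples; zip's truncation to the shortest column drops an unpaired trailing man by itself.
import Mathlib
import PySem

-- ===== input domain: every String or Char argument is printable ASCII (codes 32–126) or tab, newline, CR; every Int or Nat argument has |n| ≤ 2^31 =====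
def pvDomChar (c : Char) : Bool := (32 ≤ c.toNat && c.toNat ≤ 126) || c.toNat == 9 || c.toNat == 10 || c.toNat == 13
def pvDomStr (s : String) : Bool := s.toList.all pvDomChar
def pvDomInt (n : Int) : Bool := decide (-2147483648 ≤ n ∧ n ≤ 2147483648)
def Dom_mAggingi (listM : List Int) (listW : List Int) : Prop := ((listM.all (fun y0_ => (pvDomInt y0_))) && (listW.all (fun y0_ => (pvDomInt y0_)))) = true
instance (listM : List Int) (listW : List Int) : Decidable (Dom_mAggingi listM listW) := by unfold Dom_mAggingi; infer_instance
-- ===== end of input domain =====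

-- B builds three flat parallel columns (even-indexed men repeated, odd-indexed men repeated,
-- listW tiled) and zips them into triples, replacing A's nested index loop, parity branch and
-- try/except; objective: alternative (same asymptotic cost, different construction).


-- ===== PORT A =====
-- for i in range(0, len(listM), 2): for woman in listW: append [listM[i], listM[i+1], woman]
-- In the even branch listM[i+1] never raises (length is even), so the none-arm of the match is
-- unreachable there; in the odd branch the none-arm is the 'except: continue'.
def mAggingi (listM : List Int) (listW : List Int) : List (List Int) :=
  if listM.length % 2 = 0 then
    (PySem.List.pyRange 0 (listM.length : Int) 2).foldl (fun acc i =>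
      listW.foldl (fun acc2 woman =>
        match PySem.List.pyGet? listM i, PySem.List.pyGet? listM (i + 1) with
        | some mi, some mi1 => acc2 ++ [[mi, mi1, woman]]
        | _, _ => acc2  -- IndexError; unreachable since listM.length is even
      ) acc) []
  else if listM.length % 2 ≠ 0 then
    (PySem.List.pyRange 0 (listM.length : Int) 2).foldl (fun acc i =>
      listW.foldl (fun acc2 woman =>
        match PySem.List.pyGet? listM i, PySem.List.pyGet? listM (i + 1) with
        | some mi, some mi1 => acc2 ++ [[mi, mi1, woman]]
        | _, _ => acc2  -- except: continue
      ) acc) []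
  else []

-- ===== PORT B =====
-- hand port of the stride-2 slice xs[::2] (PySem.List.slice has no step argument); exact:
-- it takes elements at indices 0, 2, 4, …
def strideTwo : List Int → List Int
  | x :: _ :: rest => x :: strideTwo rest
  | [x] => [x]
  | [] => []

-- k = len(listM) // 2; col1 = [a for a in listM[::2] for _ in listW];
-- col2 = [b for b in listM[1::2] for _ in listW]; col3 = listW * k;
-- return [[a, b, w] for a, b, w in zip(col1, col2, col3)]    (xs[1::2] = xs[1:][::2], exact)
def mAggingi_alt (listM : List Int) (listW : List Int) : List (List Int) :=
  let k := listM.length / 2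
  let col1 := (strideTwo listM).flatMap (fun a => listW.map (fun _ => a))
  let col2 := (strideTwo listM.tail).flatMap (fun b => listW.map (fun _ => b))
  let col3 := (List.replicate k listW).flatten
  ((col1.zip col2).zip col3).map (fun p => [p.1.1, p.1.2, p.2])

-- ===== PRECONDITION & SPEC =====
def Spec_mAggingi (listM : List Int) (listW : List Int) (out : List (List Int)) : Prop := out = mAggingi_alt listM listW
instance (listM : List Int) (listW : List Int) (out : List (List Int)) : Decidable (Spec_mAggingi listM listW out) := by unfold Spec_mAggingi; infer_instance

-- ===== CLAIM (what is proved, stated in full; the proofs are below) =====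
def Claim_equal_mAggingi : Prop := ∀ (listM : List Int) (listW : List Int), Dom_mAggingi listM listW → Spec_mAggingi listM listW (mAggingi listM listW)

-- ===== LEMMAS AND PROOFS =====

-- proof-side normal form: consecutive pairs crossed with the women
def pairUp : List Int → List (Int × Int)
  | a :: b :: rest => (a, b) :: pairUp rest
  | _ => []

def crossForm (listM listW : List Int) : List (List Int) :=
  (pairUp listM).flatMap (fun p => listW.map (fun w => [p.1, p.2, w]))

lemma pyRange_two_cons (a b : Int) (h : a < b) :
    PySem.List.pyRange a b 2 = a :: PySem.List.pyRange (a+2) b 2 := by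
  rw [PySem.List.pyRange_of_pos _ _ (by norm_num : (0:Int) < 2),
      PySem.List.pyRange_of_pos _ _ (by norm_num : (0:Int) < 2)]
  have hc : (if a < b then ((b - a + 2 - 1) / 2).toNat else 0)
      = (if a + 2 < b then ((b - (a+2) + 2 - 1) / 2).toNat else 0) + 1 := by
    split <;> split <;> omega
  rw [hc, List.range_succ_eq_map]
  simp [List.map_map, Function.comp]
  intro k _; ring

lemma pyRange_two_nil (a b : Int) (h : b ≤ a) : PySem.List.pyRange a b 2 = [] := by
  rw [PySem.List.pyRange_of_pos _ _ (by norm_num : (0:Int) < 2)]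
  simp [not_lt.mpr h]

-- A's loop, started at index i, produces exactly crossForm of the suffix listM.drop i.
lemma loopA_eq (listW listM : List Int) :
    ∀ (xs : List Int) (i : Nat) (acc : List (List Int)), listM.drop i = xs →
    (PySem.List.pyRange (i : Int) (listM.length : Int) 2).foldl (fun acc i =>
      listW.foldl (fun acc2 woman =>
        match PySem.List.pyGet? listM i, PySem.List.pyGet? listM (i + 1) with
        | some mi, some mi1 => acc2 ++ [[mi, mi1, woman]]
        | _, _ => acc2) acc) acc
    = acc ++ crossForm xs listW := by
  intro xs
  induction xs using pairUp.induct with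
  | case1 a b rest ih =>
    intro i acc hdrop
    have hi : i < listM.length := by
      have := congrArg List.length hdrop
      simp at this; omega
    have ha : listM[i]? = some a := by
      have h0 : (listM.drop i)[0]? = listM[i + 0]? := List.getElem?_drop
      simpa [hdrop] using h0.symm
    have hb : listM[i+1]? = some b := by
      have h1 : (listM.drop i)[1]? = listM[i + 1]? := List.getElem?_drop
      simpa [hdrop] using h1.symm
    have hrest : listM.drop (i + 2) = rest := by
      have h2 : (listM.drop i).drop 2 = listM.drop (i + 2) := List.drop_drop
      rw [← h2, hdrop]; rfl
    rw [pyRange_two_cons _ _ (by exact_mod_cast hi)]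
    rw [List.foldl_cons]
    have hget1 : PySem.List.pyGet? listM (i : Int) = some a := by
      rw [PySem.List.pyGet?_natCast]; exact ha
    have hget2 : PySem.List.pyGet? listM ((i : Int) + 1) = some b := by
      have : ((i : Int) + 1) = ((i + 1 : Nat) : Int) := by push_cast; ring
      rw [this, PySem.List.pyGet?_natCast]; exact hb
    have hinner : ∀ (acc0 : List (List Int)),
        listW.foldl (fun acc2 woman =>
          match PySem.List.pyGet? listM (i : Int), PySem.List.pyGet? listM ((i : Int) + 1) with
          | some mi, some mi1 => acc2 ++ [[mi, mi1, woman]]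
          | _, _ => acc2) acc0
        = acc0 ++ listW.map (fun w => [a, b, w]) := by
      intro acc0
      rw [show (fun (acc2 : List (List Int)) (woman : Int) =>
            match PySem.List.pyGet? listM (i : Int), PySem.List.pyGet? listM ((i : Int) + 1) with
            | some mi, some mi1 => acc2 ++ [[mi, mi1, woman]]
            | _, _ => acc2)
          = fun acc2 woman => acc2 ++ [[a, b, woman]] by
        funext acc2 woman; rw [hget1, hget2]]
      exact PySem.List.foldl_append_singleton_eq_map (fun w => [a, b, w]) listW acc0
    rw [hinner]
    have hcast : (i : Int) + 2 = ((i + 2 : Nat) : Int) := by push_cast; ring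
    rw [hcast, ih (i + 2) _ hrest]
    simp [crossForm, pairUp]
  | case2 xs hne =>
    intro i acc hdrop
    match xs, hne with
    | a :: b :: rest, hne => exact (hne a b rest rfl).elim
    | [], _ =>
      have hlen : listM.length ≤ i := by
        by_contra hlt
        have := List.drop_eq_nil_iff.mp hdrop
        omega
      rw [pyRange_two_nil _ _ (by exact_mod_cast hlen)]
      simp [crossForm, pairUp]
    | [x], _ =>
      have hlen : listM.length = i + 1 := by
        have := congrArg List.length hdrop
        simp at this
        omega
      have hi : i < listM.length := by omega
      have hnone : listM[i+1]? = none := by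
        rw [List.getElem?_eq_none_iff]; omega
      have hget2 : PySem.List.pyGet? listM ((i : Int) + 1) = none := by
        have : ((i : Int) + 1) = ((i + 1 : Nat) : Int) := by push_cast; ring
        rw [this, PySem.List.pyGet?_natCast]; exact hnone
      rw [pyRange_two_cons _ _ (by exact_mod_cast hi)]
      rw [List.foldl_cons]
      have hinner : listW.foldl (fun acc2 woman =>
          match PySem.List.pyGet? listM (i : Int), PySem.List.pyGet? listM ((i : Int) + 1) with
          | some mi, some mi1 => acc2 ++ [[mi, mi1, woman]]
          | _, _ => acc2) acc = acc := by
        rw [show (fun (acc2 : List (List Int)) (woman : Int) =>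
              match PySem.List.pyGet? listM (i : Int), PySem.List.pyGet? listM ((i : Int) + 1) with
              | some mi, some mi1 => acc2 ++ [[mi, mi1, woman]]
              | _, _ => acc2)
            = fun acc2 _ => acc2 by
          funext acc2 woman
          rw [hget2]
          cases PySem.List.pyGet? listM (i : Int) <;> rfl]
        induction listW <;> simp_all
      rw [hinner]
      rw [pyRange_two_nil ((i : Int) + 2) _ (by omega)]
      simp [crossForm, pairUp]

lemma zip_const_triples (a b : Int) (ws : List Int) :
    (((ws.map (fun _ => a)).zip (ws.map (fun _ => b))).zip ws).map
      (fun p => [p.1.1, p.1.2, p.2]) = ws.map (fun w => [a, b, w]) := by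
  induction ws with
  | nil => rfl
  | cons w ws ihw =>
    simp only [List.map_cons, List.zip_cons_cons]
    exact congrArg _ ihw

lemma strideTwo_cons_tail (x : Int) (xs : List Int) :
    strideTwo (x :: xs) = x :: strideTwo xs.tail := by
  cases xs <;> rfl

-- B's columnar construction also equals crossForm.
lemma alt_eq_crossForm (listM listW : List Int) :
    mAggingi_alt listM listW = crossForm listM listW := by
  induction listM using pairUp.induct with
  | case1 a b rest ih =>
    have hlen : (a :: b :: rest).length / 2 = rest.length / 2 + 1 := by
      simp [List.length_cons]; omega
    simp only [mAggingi_alt, crossForm, pairUp, hlen] at *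
    rw [strideTwo_cons_tail a (b :: rest)]
    simp only [List.tail_cons]
    rw [strideTwo_cons_tail b rest]
    simp only [List.flatMap_cons, List.replicate_succ, List.flatten_cons]
    rw [List.zip_append (by simp), List.zip_append (by simp), List.map_append]
    rw [zip_const_triples a b listW, ih]
  | case2 xs hne =>
    match xs, hne with
    | a :: b :: rest, hne => exact (hne a b rest rfl).elim
    | [], _ => rfl
    | [x], _ => simp [mAggingi_alt, crossForm, pairUp, strideTwo]

-- ===== VERDICT (by name: the statement is the Claim_ definition above) =====
theorem mAggingi_spec : Claim_equal_mAggingi := by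
  intro listM listW _
  unfold Spec_mAggingi mAggingi
  have h0 := loopA_eq listW listM listM 0 [] (by simp)
  simp only [Nat.cast_zero] at h0
  rw [alt_eq_crossForm]
  by_cases h : listM.length % 2 = 0 <;> simp [h, h0]
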